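-- pv_equiv track=rewrite | github.com/0HOON/Algorithm_Study | 프로그래머스/lv2/131127. 할인 행사/할인 행사.py | solution
-- ===== SOURCE A (Python) =====
-- def solution(want, number, discount):
--     answer = 0
--     memo = {w: n for w, n in zip(want, number)}
--     total = 0
--     for i, item in enumerate(discount):
--         if i > 9:
--             it = discount[i-10]
--             if memo.get(it) != None:
--                 memo[it] += 1
--                 if memo[it] > 0:
--                     total -= 1
--
--         if memo.get(item) != None:
--             memo[item] -= 1
--             if memo[item] >= 0:
--                 total += 1
--
--         if total == 10:
--             answer += 1
--
--
--     return answer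
-- ===== SOURCE B (Python) =====
-- def solution(want, number, discount):
--     # Per-window recount: for each 10-day window, check every discounted item
--     # is wanted and its count in the window does not exceed the wanted count.
--     memo = dict(zip(want, number))
--     answer = 0
--     for i in range(len(discount) - 9):
--         window = discount[i:i+10]
--         if all(w in memo and window.count(w) <= memo[w] for w in window):
--             answer += 1
--     return answer
-- ===== Notes on version B (the rewrite author's own statement) =====
-- stated objective: simpler
-- what changed: Replaces A's incremental sliding-window bookkeeping (mutating a counts dict and a running 'total' as days enter/leave the window) with a direct per-window recount: for each start index, recount the 10-day slice and check every item is wanted with count <= wanted number.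
import Mathlib
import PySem

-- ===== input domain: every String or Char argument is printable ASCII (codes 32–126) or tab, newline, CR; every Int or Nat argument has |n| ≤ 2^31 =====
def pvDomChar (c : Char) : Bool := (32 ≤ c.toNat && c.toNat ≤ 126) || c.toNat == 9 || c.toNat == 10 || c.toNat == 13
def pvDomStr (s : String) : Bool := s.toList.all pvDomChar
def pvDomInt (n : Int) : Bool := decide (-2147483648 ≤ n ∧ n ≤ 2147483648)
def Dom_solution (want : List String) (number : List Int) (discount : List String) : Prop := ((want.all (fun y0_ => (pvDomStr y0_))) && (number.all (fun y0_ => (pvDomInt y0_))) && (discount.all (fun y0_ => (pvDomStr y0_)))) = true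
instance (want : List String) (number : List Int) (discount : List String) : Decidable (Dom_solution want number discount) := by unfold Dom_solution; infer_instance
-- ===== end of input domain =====

-- B replaces A's incremental sliding-window bookkeeping with a per-window recount of each 10-day slice (same results, plainer code).

-- ===== PORT A =====
-- 'memo[it] += 1; if memo[it] > 0: total -= 1' block of A's loop body (the day leaving the window)
def remCore (it : String) (mt : PySem.Dict String Int × Int) : PySem.Dict String Int × Int :=
  match mt.1.get? it with
  | none => mt
  | some v => (mt.1.insert it (v + 1), if v + 1 > 0 then mt.2 - 1 else mt.2)

-- 'if i > 9: it = discount[i-10]; if memo.get(it) != None: ...' part of A's loop body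
def remA (discount : List String) (i : Int) (mt : PySem.Dict String Int × Int) : PySem.Dict String Int × Int :=
  if i > 9 then
    match PySem.List.pyGet? discount (i - 10) with
    | none => mt
    | some it => remCore it mt
  else mt

-- 'if memo.get(item) != None: memo[item] -= 1; if memo[item] >= 0: total += 1' (the day entering the window)
def addA (item : String) (mt : PySem.Dict String Int × Int) : PySem.Dict String Int × Int :=
  match mt.1.get? item with
  | none => mt
  | some v => (mt.1.insert item (v - 1), if v - 1 ≥ 0 then mt.2 + 1 else mt.2)

-- one iteration of A's 'for i, item in enumerate(discount)' body; state = (answer, memo, total)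
def stepA (discount : List String) (st : Int × PySem.Dict String Int × Int) (p : Int × String) :
    Int × PySem.Dict String Int × Int :=
  let mt := addA p.2 (remA discount p.1 (st.2.1, st.2.2))
  (if mt.2 == 10 then st.1 + 1 else st.1, mt.1, mt.2)

def solution (want : List String) (number : List Int) (discount : List String) : Int :=
  let memo : PySem.Dict String Int :=
    (want.zip number).foldl (fun d p => d.insert p.1 p.2) PySem.Dict.empty
  ((PySem.List.enumerate discount 0).foldl (stepA discount) (0, memo, 0)).1

-- ===== PORT B =====
-- 'all(w in memo and window.count(w) <= memo[w] for w in window)'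
def bpred (memo : PySem.Dict String Int) (window : List String) : Bool :=
  window.all (fun w =>
    match memo.get? w with
    | none => false
    | some m => decide ((PySem.List.count window w : Int) ≤ m))

def solution_alt (want : List String) (number : List Int) (discount : List String) : Int :=
  let memo : PySem.Dict String Int :=
    (want.zip number).foldl (fun d p => d.insert p.1 p.2) PySem.Dict.empty
  (PySem.List.pyRange 0 ((discount.length : Int) - 9) 1).foldl
    (fun answer i =>
      if bpred memo (PySem.List.slice discount (some i) (some (i + 10))) then answer + 1 else answer)
    0

-- ===== PRECONDITION & SPEC =====
def Spec_solution (want : List String) (number : List Int) (discount : List String) (out : Int) : Prop := out = solution_alt want number discount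
instance (want : List String) (number : List Int) (discount : List String) (out : Int) : Decidable (Spec_solution want number discount out) := by unfold Spec_solution; infer_instance

-- ===== CLAIM (what is proved, stated in full; the proofs are below) =====
def Claim_equal_solution : Prop := ∀ (want : List String) (number : List Int) (discount : List String), Dom_solution want number discount → Spec_solution want number discount (solution want number discount)

-- ===== LEMMAS AND PROOFS =====
def winL (d : List String) (j : Nat) : List String := (d.take j).drop (j - 10)

def gKey (memo0 : PySem.Dict String Int) (l : List String) (k : String) : Int :=
  match memo0.get? k with
  | none => 0
  | some m => max 0 (min (l.count k : Int) m)

def Fval (memo0 : PySem.Dict String Int) (l : List String) : Int :=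
  (memo0.keys.map (gKey memo0 l)).sum

lemma sum_map_update {f g : String → Int} {L : List String} (x : String) (hL : L.Nodup)
    (hfg : ∀ k, k ≠ x → f k = g k) :
    (L.map f).sum = (L.map g).sum + (if x ∈ L then f x - g x else 0) := by
  induction L with
  | nil => simp
  | cons a L ih =>
    rcases List.nodup_cons.mp hL with ⟨ha, hL'⟩
    by_cases hax : a = x
    · have hmap : L.map f = L.map g :=
        List.map_congr_left (fun k hk => hfg k (by rintro rfl; exact ha (hax ▸ hk)))
    
      subst hax
      simp [hmap]
      ring
    · rw [List.map_cons, List.map_cons, List.sum_cons, List.sum_cons, ih hL', hfg a hax]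
      have hnx : ¬ x = a := fun h => hax h.symm
      by_cases hxL : x ∈ L
      · simp [List.mem_cons, hxL]; ring
      · simp [List.mem_cons, hxL, hnx]

lemma gKey_count_eq (memo0 : PySem.Dict String Int) {l l' : List String} {k : String}
    (h : l.count k = l'.count k) : gKey memo0 l k = gKey memo0 l' k := by
  unfold gKey; cases memo0.get? k <;> simp [h]

lemma Fval_update (memo0 : PySem.Dict String Int) (hnd : memo0.keys.Nodup)
    {l l' : List String} (x : String) (hc : ∀ k, k ≠ x → l'.count k = l.count k) :
    Fval memo0 l' = Fval memo0 l + (gKey memo0 l' x - gKey memo0 l x) := by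
  unfold Fval
  rw [sum_map_update x hnd (fun k hk => gKey_count_eq memo0 (hc k hk))]
  by_cases hx : x ∈ memo0.keys
  · simp [hx]
  · have h0 : memo0.get? x = none := by
      rw [PySem.Dict.get?_eq_none_iff_not_mem_keys]; exact hx
    have hg : ∀ l'' : List String, gKey memo0 l'' x = 0 := fun l'' => by
      unfold gKey; rw [h0]
    rw [if_neg hx, hg, hg]; ring_nf

lemma Fval_append (memo0 : PySem.Dict String Int) (hnd : memo0.keys.Nodup)
    (l : List String) (x : String) :
    Fval memo0 (l ++ [x]) = Fval memo0 l + (gKey memo0 (l ++ [x]) x - gKey memo0 l x) :=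
  Fval_update memo0 hnd x (fun k hk => by
    simp [List.count_append, Ne.symm hk])

lemma Fval_cons (memo0 : PySem.Dict String Int) (hnd : memo0.keys.Nodup)
    (l : List String) (x : String) :
    Fval memo0 (x :: l) = Fval memo0 l + (gKey memo0 (x :: l) x - gKey memo0 l x) :=
  Fval_update memo0 hnd x (fun k hk => by simp [Ne.symm hk])

def InvA (memo0 : PySem.Dict String Int) (l : List String)
    (memo : PySem.Dict String Int) (total : Int) : Prop :=
  (∀ s, memo.get? s = (memo0.get? s).map (fun v => v - (l.count s : Int))) ∧ total = Fval memo0 l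

lemma add_inv (memo0 : PySem.Dict String Int) (hnd : memo0.keys.Nodup) (x : String)
    (l : List String) (memo : PySem.Dict String Int) (total : Int)
    (h : InvA memo0 l memo total) :
    InvA memo0 (l ++ [x]) (addA x (memo, total)).1 (addA x (memo, total)).2 := by
  rcases h with ⟨h1, h2⟩
  have hFA := Fval_append memo0 hnd l x
  rcases hm0 : memo0.get? x with _ | m
  · have hm : memo.get? x = none := by rw [h1 x, hm0]; rfl
    have hg : gKey memo0 (l ++ [x]) x = gKey memo0 l x := by unfold gKey; rw [hm0]
    constructor
    · intro s
      simp only [addA, hm]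
      rcases eq_or_ne s x with rfl | hs
      · rw [h1 s, hm0]; rfl
      · rw [h1 s, List.count_append, List.count_singleton]
        simp [Ne.symm hs]
    · simp only [addA, hm]
      rw [h2, hFA, hg]; ring
  · have hm : memo.get? x = some (m - (l.count x : Int)) := by rw [h1 x, hm0]; rfl
    have hcx : ((l ++ [x]).count x : Int) = (l.count x : Int) + 1 := by
      rw [List.count_append]; simp
    have hgl : gKey memo0 l x = max 0 (min (l.count x : Int) m) := by unfold gKey; rw [hm0]
    have hgl' : gKey memo0 (l ++ [x]) x = max 0 (min ((l.count x : Int) + 1) m) := by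
      unfold gKey; rw [hm0]; simp only [hcx]
    have hc0 : (0 : Int) ≤ (l.count x : Int) := Int.natCast_nonneg _
    constructor
    · intro s
      simp only [addA, hm]
      rcases eq_or_ne s x with rfl | hs
      · rw [PySem.Dict.get?_insert_self, hm0, hcx]
        simp; ring
      · rw [PySem.Dict.get?_insert_of_ne _ _ hs, h1 s, List.count_append,
            List.count_singleton]
        simp [Ne.symm hs]
    · simp only [addA, hm]
      rw [h2, hFA, hgl, hgl']
      split_ifs with hv <;> omega

lemma rem_inv (memo0 : PySem.Dict String Int) (hnd : memo0.keys.Nodup) (x : String)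
    (l : List String) (memo : PySem.Dict String Int) (total : Int)
    (h : InvA memo0 (x :: l) memo total) :
    InvA memo0 l (remCore x (memo, total)).1 (remCore x (memo, total)).2 := by
  rcases h with ⟨h1, h2⟩
  have hFA := Fval_cons memo0 hnd l x
  have hcx : ((x :: l).count x : Int) = (l.count x : Int) + 1 := by simp
  rcases hm0 : memo0.get? x with _ | m
  · have hm : memo.get? x = none := by rw [h1 x, hm0]; rfl
    have hg : gKey memo0 (x :: l) x = gKey memo0 l x := by unfold gKey; rw [hm0]
    constructor
    · intro s
      simp only [remCore, hm]
      rcases eq_or_ne s x with rfl | hs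
      · rw [h1 s, hm0]; rfl
      · rw [h1 s, List.count_cons]
        simp [Ne.symm hs]
    · simp only [remCore, hm]
      rw [h2, hFA, hg]; ring
  · have hm : memo.get? x = some (m - ((l.count x : Int) + 1)) := by
      rw [h1 x, hm0]; simp
    have hgl : gKey memo0 l x = max 0 (min (l.count x : Int) m) := by unfold gKey; rw [hm0]
    have hgl' : gKey memo0 (x :: l) x = max 0 (min ((l.count x : Int) + 1) m) := by
      unfold gKey; rw [hm0]; simp only [hcx]
    have hc0 : (0 : Int) ≤ (l.count x : Int) := Int.natCast_nonneg _
    constructor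
    · intro s
      simp only [remCore, hm]
      rcases eq_or_ne s x with rfl | hs
      · rw [PySem.Dict.get?_insert_self, hm0]
        simp; ring
      · rw [PySem.Dict.get?_insert_of_ne _ _ hs, h1 s, List.count_cons]
        simp [Ne.symm hs]
    · simp only [remCore, hm]
      rw [h2, hFA, hgl, hgl']
      split_ifs with hv <;> omega

lemma sum_count_eq_countP (L : List String) (hL : L.Nodup) :
    ∀ w : List String, (L.map (fun k => (w.count k : Int))).sum
      = (w.countP (fun x => decide (x ∈ L)) : Int) := by
  intro w
  induction w with
  | nil => simp
  | cons x w ih =>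
    have hupd :
        (L.map (fun k => ((x :: w).count k : Int))).sum
          = (L.map (fun k => (w.count k : Int))).sum
            + (if x ∈ L then ((x :: w).count x : Int) - (w.count x : Int) else 0) := by
      apply sum_map_update x hL
      intro k hk
      simp [Ne.symm hk]
    rw [hupd, ih, List.countP_cons]
    by_cases hxL : x ∈ L
    · simp [hxL]
    · simp [hxL]

lemma gKey_le_count (memo0 : PySem.Dict String Int) (l : List String) (k : String) :
    gKey memo0 l k ≤ (l.count k : Int) := by
  have h0 : (0 : Int) ≤ (l.count k : Int) := Int.natCast_nonneg _
  unfold gKey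
  split
  · exact h0
  · omega

lemma Fval_le_countP (memo0 : PySem.Dict String Int) (hnd : memo0.keys.Nodup)
    (l : List String) :
    Fval memo0 l ≤ (l.countP (fun x => decide (x ∈ memo0.keys)) : Int) := by
  rw [← sum_count_eq_countP memo0.keys hnd l]
  exact List.sum_le_sum (fun k _ => gKey_le_count memo0 l k)

lemma Fval_le_length (memo0 : PySem.Dict String Int) (hnd : memo0.keys.Nodup)
    (l : List String) : Fval memo0 l ≤ (l.length : Int) := by
  calc Fval memo0 l ≤ _ := Fval_le_countP memo0 hnd l
    _ ≤ (l.length : Int) := by exact_mod_cast List.countP_le_length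

lemma map_sum_eq_of_le {f g : String → Int} :
    ∀ L : List String, (∀ k ∈ L, f k ≤ g k) → (L.map f).sum = (L.map g).sum →
      ∀ k ∈ L, f k = g k := by
  intro L
  induction L with
  | nil => simp
  | cons a L ih =>
    intro hle hsum k hk
    have hsum' : (L.map f).sum ≤ (L.map g).sum :=
      List.sum_le_sum (fun j hj => hle j (List.mem_cons_of_mem a hj))
    have ha : f a ≤ g a := hle a List.mem_cons_self
    simp only [List.map_cons, List.sum_cons] at hsum
    have hfa : f a = g a := by omega
    have hLsum : (L.map f).sum = (L.map g).sum := by omega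
    rcases List.mem_cons.mp hk with rfl | hk'
    · exact hfa
    · exact ih (fun j hj => hle j (List.mem_cons_of_mem a hj)) hLsum k hk'

lemma gKey_some (memo0 : PySem.Dict String Int) {k : String} {m : Int}
    (h : memo0.get? k = some m) (l : List String) :
    gKey memo0 l k = max 0 (min (l.count k : Int) m) := by
  unfold gKey; rw [h]

lemma mem_keys_get? (memo0 : PySem.Dict String Int) (x : String) (hx : x ∈ memo0.keys) :
    ∃ m, memo0.get? x = some m := by
  rcases hg : memo0.get? x with _ | m
  · exact absurd (((PySem.Dict.get?_eq_none_iff_not_mem_keys _ _).mp hg)) (not_not_intro hx)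
  · exact ⟨m, rfl⟩

lemma Fval_eq_ten_iff (memo0 : PySem.Dict String Int) (hnd : memo0.keys.Nodup)
    (w : List String) (hw : w.length = 10) :
    Fval memo0 w = 10 ↔ ∀ x ∈ w, ∃ m, memo0.get? x = some m ∧ (w.count x : Int) ≤ m := by
  constructor
  · intro hF
    have hle1 := Fval_le_countP memo0 hnd w
    have hcle : w.countP (fun x => decide (x ∈ memo0.keys)) ≤ 10 :=
      hw ▸ List.countP_le_length
    have hcp : w.countP (fun x => decide (x ∈ memo0.keys)) = w.length := by
      rw [hw]
      have : (w.countP (fun x => decide (x ∈ memo0.keys)) : Int) = 10 := by omega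
      exact_mod_cast this
    have hmem : ∀ x ∈ w, x ∈ memo0.keys := by
      have := List.countP_eq_length.mp hcp
      intro x hx
      simpa using this x hx
    have hsum : (memo0.keys.map (gKey memo0 w)).sum
        = (memo0.keys.map (fun k => (w.count k : Int))).sum := by
      rw [sum_count_eq_countP memo0.keys hnd w]
      rw [hcp, hw]
      exact hF
    have hpt : ∀ k ∈ memo0.keys, gKey memo0 w k = (w.count k : Int) :=
      map_sum_eq_of_le memo0.keys (fun k _ => gKey_le_count memo0 w k) hsum
    intro x hx
    have hxk := hmem x hx
    rcases mem_keys_get? memo0 x hxk with ⟨m, hm⟩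
    refine ⟨m, hm, ?_⟩
    have hg := hpt x hxk
    have hc1 : 1 ≤ w.count x := List.count_pos_iff.mpr hx
    rw [gKey_some memo0 hm w] at hg
    have hc1' : (1 : Int) ≤ (w.count x : Int) := by exact_mod_cast hc1
    omega
  · intro h
    have hmem : ∀ x ∈ w, x ∈ memo0.keys := by
      intro x hx
      rcases h x hx with ⟨m, hm, _⟩
      by_contra hxk
      rw [(PySem.Dict.get?_eq_none_iff_not_mem_keys _ _).mpr hxk] at hm
      simp at hm
    have hpt : ∀ k ∈ memo0.keys, gKey memo0 w k = (w.count k : Int) := by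
      intro k _
      rcases Nat.eq_zero_or_pos (w.count k) with hc | hc
      · rcases hg : memo0.get? k with _ | m
        · unfold gKey; rw [hg, hc]; simp
        · rw [gKey_some memo0 hg w, hc]; simp
      · have hkw : k ∈ w := List.count_pos_iff.mp hc
        rcases h k hkw with ⟨m, hm, hcm⟩
        rw [gKey_some memo0 hm w]
        have : (0 : Int) ≤ (w.count k : Int) := Int.natCast_nonneg _
        omega
    have hcp : w.countP (fun x => decide (x ∈ memo0.keys)) = w.length :=
      List.countP_eq_length.mpr (fun x hx => by simpa using hmem x hx)
    unfold Fval
    rw [List.map_congr_left hpt, sum_count_eq_countP memo0.keys hnd w, hcp, hw]; rfl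

lemma winL_succ_le (d : List String) (j : Nat) (hle : j ≤ 9) (hj : j < d.length) :
    winL d (j + 1) = winL d j ++ [d[j]] := by
  unfold winL
  have h1 : j - 10 = 0 := by omega
  have h2 : j + 1 - 10 = 0 := by omega
  rw [h1, h2, List.drop_zero, List.drop_zero, List.take_add_one, List.getElem?_eq_getElem hj]
  rfl

lemma winL_cons (d : List String) (j : Nat) (h10 : 10 ≤ j) (hj : j < d.length) :
    winL d j = d[j - 10] :: (d.take j).drop (j - 9) := by
  unfold winL
  have hlen : j - 10 < (d.take j).length := by
    rw [List.length_take]; omega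
  rw [List.drop_eq_getElem_cons hlen]
  congr 1
  · rw [List.getElem_take]
  · congr 1; omega

lemma winL_succ_ge (d : List String) (j : Nat) (h10 : 10 ≤ j) (hj : j < d.length) :
    winL d (j + 1) = (d.take j).drop (j - 9) ++ [d[j]] := by
  unfold winL
  have h1 : j + 1 - 10 = j - 9 := by omega
  rw [h1, List.take_add_one, List.getElem?_eq_getElem hj]
  have hle : j - 9 ≤ (d.take j).length := by rw [List.length_take]; omega
  rw [List.drop_append_of_le_length hle]
  rfl

lemma step_spec (memo0 : PySem.Dict String Int) (hnd : memo0.keys.Nodup)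
    (d : List String) (j : Nat) (hj : j < d.length)
    (answer total : Int) (memo : PySem.Dict String Int)
    (h : InvA memo0 (winL d j) memo total) :
    stepA d (answer, memo, total) ((j : Int), d[j])
      = ((if Fval memo0 (winL d (j + 1)) = 10 then answer + 1 else answer),
         (addA d[j] (remA d (j : Int) (memo, total))).1,
         (addA d[j] (remA d (j : Int) (memo, total))).2)
      ∧ InvA memo0 (winL d (j + 1)) (addA d[j] (remA d (j : Int) (memo, total))).1
          (addA d[j] (remA d (j : Int) (memo, total))).2 := by
  have hmain : InvA memo0 (winL d (j + 1)) (addA d[j] (remA d (j : Int) (memo, total))).1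
      (addA d[j] (remA d (j : Int) (memo, total))).2 := by
    by_cases hle : j ≤ 9
    · have hrem : remA d (j : Int) (memo, total) = (memo, total) := by
        unfold remA
        rw [if_neg (by exact_mod_cast Nat.not_lt.mpr hle)]
      rw [hrem, winL_succ_le d j hle hj]
      exact add_inv memo0 hnd _ _ memo total h
    · have h10 : 10 ≤ j := by omega
      have hidx : (j : Int) - 10 = ((j - 10 : Nat) : Int) := by push_cast [h10]; ring
      have hrem : remA d (j : Int) (memo, total) = remCore d[j - 10] (memo, total) := by
        unfold remA
        rw [if_pos (by exact_mod_cast (by omega : 9 < j)), hidx, PySem.List.pyGet?_natCast,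
            List.getElem?_eq_getElem (by omega : j - 10 < d.length)]
      rw [hrem, winL_succ_ge d j h10 hj]
      apply add_inv memo0 hnd _ _ _ _
      have h' : InvA memo0 (d[j - 10] :: (d.take j).drop (j - 9)) memo total := by
        rw [← winL_cons d j h10 hj]; exact h
      exact rem_inv memo0 hnd _ _ memo total h'
  refine ⟨?_, hmain⟩
  unfold stepA
  rcases hmain with ⟨_, htot⟩
  simp only []
  rw [htot]
  congr 1
  by_cases hF : Fval memo0 (winL d (j + 1)) = 10
  · simp [hF]
  · simp [hF]

lemma loopA (memo0 : PySem.Dict String Int) (hnd : memo0.keys.Nodup) (d : List String) :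
    ∀ (k j : Nat), j + k = d.length →
    ∀ (answer total : Int) (memo : PySem.Dict String Int),
      InvA memo0 (winL d j) memo total →
      ((PySem.List.enumerate (d.drop j) (j : Int)).foldl (stepA d) (answer, memo, total)).1
        = answer + ((List.range k).map
            (fun t => if Fval memo0 (winL d (j + t + 1)) = 10 then (1 : Int) else 0)).sum := by
  intro k
  induction k with
  | zero =>
    intro j hlen answer total memo _
    have : d.drop j = [] := List.drop_of_length_le (by omega)
    simp [this]
  | succ k ih =>
    intro j hlen answer total memo hinv
    have hj : j < d.length := by omega
    rw [List.drop_eq_getElem_cons hj, PySem.List.enumerate_cons, List.foldl_cons]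
    rcases step_spec memo0 hnd d j hj answer total memo hinv with ⟨hstep, hinv'⟩
    rw [hstep]
    have hcast : (j : Int) + 1 = ((j + 1 : Nat) : Int) := by push_cast; ring
    rw [hcast, ih (j + 1) (by omega) _ _ _ hinv']
    rw [List.range_succ_eq_map, List.map_cons, List.map_map, List.sum_cons]
    have hidx : ∀ t : Nat, j + 1 + t + 1 = j + (t + 1) + 1 := by omega
    simp only [Function.comp_def, Nat.succ_eq_add_one, hidx]
    by_cases hF : Fval memo0 (winL d (j + 0 + 1)) = 10
    · rw [if_pos (by simpa using hF), if_pos hF]; ring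
    · rw [if_neg (by simpa using hF), if_neg hF]; ring

lemma bpred_iff (memo0 : PySem.Dict String Int) (w : List String) :
    bpred memo0 w = true ↔ ∀ x ∈ w, ∃ m, memo0.get? x = some m ∧ (w.count x : Int) ≤ m := by
  unfold bpred
  rw [List.all_eq_true]
  constructor
  · intro h x hx
    have := h x hx
    rcases hm : memo0.get? x with _ | m
    · rw [hm] at this; simp at this
    · rw [hm] at this
      simp only [PySem.List.count_eq, decide_eq_true_eq] at this
      exact ⟨m, rfl, this⟩
  · intro h x hx
    rcases h x hx with ⟨m, hm, hc⟩
    rw [hm]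
    simp only [PySem.List.count_eq, decide_eq_true_eq]
    exact hc

lemma Fval_nil (memo0 : PySem.Dict String Int) : Fval memo0 [] = 0 := by
  unfold Fval
  rw [List.map_congr_left (fun k _ => ?_), List.map_const, List.sum_replicate, smul_zero]
  unfold gKey
  split
  · rfl
  · simp

lemma ind_zero_of_lt (memo0 : PySem.Dict String Int) (hnd : memo0.keys.Nodup)
    (d : List String) (t : Nat) (ht : t + 1 ≤ 9) :
    ¬ Fval memo0 (winL d (t + 1)) = 10 := by
  intro hF
  have hlen : (winL d (t + 1)).length ≤ t + 1 := by
    unfold winL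
    calc ((d.take (t + 1)).drop (t + 1 - 10)).length ≤ (d.take (t + 1)).length :=
          by rw [List.length_drop]; omega
      _ ≤ t + 1 := by rw [List.length_take]; omega
  have := Fval_le_length memo0 hnd (winL d (t + 1))
  omega

theorem solution_eq_alt (want : List String) (number : List Int) (discount : List String) :
    solution want number discount = solution_alt want number discount := by
  unfold solution solution_alt
  set memo0 : PySem.Dict String Int :=
    (want.zip number).foldl (fun d p => d.insert p.1 p.2) PySem.Dict.empty with hmemo0
  have hnd : memo0.keys.Nodup := by
    rw [hmemo0]
    exact PySem.Dict.nodup_keys_foldl_insert_key _ Prod.fst _ _ (by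
      simp [PySem.Dict.keys, PySem.Dict.empty])
  set n := discount.length with hn
  -- A side via loopA
  have hinv0 : InvA memo0 (winL discount 0) memo0 0 := by
    constructor
    · intro s
      unfold winL
      simp
    · have : winL discount 0 = [] := by unfold winL; simp
      rw [this, Fval_nil]
  have hA := loopA memo0 hnd discount n 0 (by omega) 0 0 memo0 hinv0
  rw [List.drop_zero, Nat.cast_zero] at hA
  rw [hA]
  -- B side as countP
  rw [PySem.List.foldl_if_add_one]
  rw [PySem.List.pyRange_one, List.countP_map]
  have htoNat : ((n : Int) - 9 - 0).toNat = n - 9 := by omega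
  rw [htoNat]
  rw [← PySem.List.sum_map_ite_one_zero]
  -- split the A sum
  simp only [Function.comp_def, zero_add]
  have hz9 : ∀ t ∈ List.range 9, (if Fval memo0 (winL discount (t + 1)) = 10 then (1 : Int) else 0) = 0 := by
    intro t ht
    have ht' : t < 9 := List.mem_range.mp ht
    rw [if_neg (ind_zero_of_lt memo0 hnd discount t (by omega))]
  have hterm : ∀ t : Nat, t + 10 ≤ n →
      (if Fval memo0 (winL discount (9 + t + 1)) = 10 then (1 : Int) else 0)
        = (if bpred memo0 (PySem.List.slice discount (some ((t : Int))) (some ((t : Int) + 10))) = true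
            then (1 : Int) else 0) := by
    intro t ht
    have hslice : PySem.List.slice discount (some ((t : Int))) (some ((t : Int) + 10))
        = (discount.drop t).take 10 := by
      have h10 : ((t : Int)) + 10 = ((t : Int)) + ((10 : Nat) : Int) := by norm_num
      rw [h10, PySem.List.slice_natCast_add]
    have hwin : winL discount (9 + t + 1) = (discount.drop t).take 10 := by
      unfold winL
      have h1 : 9 + t + 1 = t + 10 := by omega
      rw [h1]
      have h2 : t + 10 - 10 = t := by omega
      rw [h2, List.drop_take]
      congr 1
      omega
    have hlen : ((discount.drop t).take 10).length = 10 := by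
      rw [List.length_take, List.length_drop]
      omega
    rw [hslice, hwin]
    by_cases hF : Fval memo0 ((discount.drop t).take 10) = 10
    · rw [if_pos hF, if_pos ?_]
      rw [bpred_iff]
      exact (Fval_eq_ten_iff memo0 hnd _ hlen).mp hF
    · rw [if_neg hF, if_neg ?_]
      rw [bpred_iff]
      exact fun h => hF ((Fval_eq_ten_iff memo0 hnd _ hlen).mpr h)
  by_cases hcase : n ≤ 9
  · have h9 : n - 9 = 0 := by omega
    have hz : ∀ t ∈ List.range n, (if Fval memo0 (winL discount (t + 1)) = 10 then (1 : Int) else 0) = 0 := by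
      intro t ht
      have ht' : t < n := List.mem_range.mp ht
      rw [if_neg (ind_zero_of_lt memo0 hnd discount t (by omega))]
    rw [List.map_congr_left hz, h9]
    simp
  · have hsplit : List.range n = List.range 9 ++ (List.range (n - 9)).map (fun t => 9 + t) := by
      rw [← List.range_add]
      congr 1
      omega
    rw [hsplit, List.map_append, List.sum_append, List.map_congr_left hz9, List.map_map]
    have hc0 : (List.map (fun _ => (0 : Int)) (List.range 9)).sum = 0 := by simp
    rw [hc0, zero_add]
    congr 1
    apply List.map_congr_left
    intro t ht
    have ht' : t < n - 9 := List.mem_range.mp ht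
    exact hterm t (by omega)

-- ===== VERDICT (by name: the statement is the Claim_ definition above) =====
theorem solution_spec : Claim_equal_solution := by
  intro want number discount _
  exact solution_eq_alt want number discount
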